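-- pv_equiv track=rewrite | github.com/Lunarage/aoc2025 | 03/joltage.py | n_ordered_largest
-- ===== SOURCE A (Python) =====
-- from typing import List
--
-- def nth_largest_index(list: List[int], n: int):
--     sorted_list = sorted(list, reverse=True)
--     return list.index(sorted_list[n-1])
--
-- def n_ordered_largest(joltages: List[int], n: int):
--     largest_idx: int
--     for i in range(1, n+1):
--         largest_idx = nth_largest_index(joltages, i)
--         right = joltages[largest_idx+1:]
--         if len(right) < (n-1):
--             continue
--         return [joltages[largest_idx], max(right)]
-- ===== SOURCE B (Python) =====
-- from typing import List
--
-- def n_ordered_largest(joltages: List[int], n: int):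
--     m = len(joltages)
--     sorted_desc = sorted(joltages, reverse=True)
--     first = {}
--     for idx, v in enumerate(joltages):
--         if v not in first:
--             first[v] = idx
--     # suf[k] = max(joltages[k:])
--     suf = [0] * m
--     for k in range(m - 1, -1, -1):
--         suf[k] = joltages[k] if k == m - 1 else max(joltages[k], suf[k + 1])
--     for i in range(1, n + 1):
--         idx = first[sorted_desc[i - 1]]
--         if m - idx - 1 >= n - 1:
--             return [joltages[idx], suf[idx + 1]]
--     return None
-- ===== Notes on version B (the rewrite author's own statement) =====
-- stated objective: faster
-- what changed: A re-sorts the whole list and rescans it (list.index, max of a fresh slice) on every loop iteration; B sorts once, builds a first-occurrence index dict and a suffix-maximum array in one pass each, so each iteration is O(1).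
import Mathlib
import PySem

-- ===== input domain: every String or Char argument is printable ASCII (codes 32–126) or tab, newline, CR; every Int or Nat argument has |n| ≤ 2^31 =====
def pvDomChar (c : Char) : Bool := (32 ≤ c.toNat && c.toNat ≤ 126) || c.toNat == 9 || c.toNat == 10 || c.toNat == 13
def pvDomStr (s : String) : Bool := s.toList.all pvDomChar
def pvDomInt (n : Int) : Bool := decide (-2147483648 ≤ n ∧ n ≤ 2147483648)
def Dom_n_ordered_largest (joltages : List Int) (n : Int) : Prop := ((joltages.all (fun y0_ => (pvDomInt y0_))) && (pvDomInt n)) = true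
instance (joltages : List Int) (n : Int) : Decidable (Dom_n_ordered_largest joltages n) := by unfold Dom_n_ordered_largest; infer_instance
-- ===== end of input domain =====

-- B sorts once and precomputes a first-occurrence index dict and a suffix-maximum array
-- instead of re-sorting and rescanning the list on every loop iteration (objective: faster).


-- ===== PORT A =====
-- helper nth_largest_index: sorted(list, reverse=True)[n-1], then list.index of it
-- (none where Python raises; list.index is ported as a match even though it cannot fail here)
def nthLargestIndexA (list : List Int) (n : Int) : Option Int :=
  let sorted_list := PySem.List.sorted list (fun x => x) true
  match PySem.List.pyGet? sorted_list (n - 1) with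
  | none => none
  | some v =>
    match PySem.List.index? list v with
    | none => none
    | some k => some (k : Int)

-- A's for-loop over range(1, n+1), with its early return ([joltages[idx], max(right)])
def loopA (joltages : List Int) (n : Int) : List Int → Option (List Int)
  | [] => none
  | i :: rest =>
    match nthLargestIndexA joltages i with
    | none => none
    | some largest_idx =>
      let right := PySem.List.slice joltages (some (largest_idx + 1)) none
      if (right.length : Int) < n - 1 then loopA joltages n rest
      else
        match PySem.List.pyGet? joltages largest_idx, PySem.List.max? right (fun x => x) with
        | some a, some mx => some [a, mx]
        | _, _ => none

def n_ordered_largest (joltages : List Int) (n : Int) : Option (List Int) :=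
  loopA joltages n (PySem.List.pyRange 1 (n + 1) 1)

-- ===== PORT B =====
-- first = {}; for idx, v in enumerate(joltages): if v not in first: first[v] = idx
def firstIdxB (joltages : List Int) : PySem.Dict Int Int :=
  (PySem.List.enumerate joltages 0).foldl
    (fun d p => if d.contains p.2 then d else d.insert p.2 p.1) PySem.Dict.empty

-- suf[k] = joltages[k] if k == m-1 else max(joltages[k], suf[k+1]) — built from the right
def sufMaxB : List Int → List Int
  | [] => []
  | v :: rest =>
    match sufMaxB rest with
    | [] => [v]
    | w :: ws => max v w :: w :: ws

-- for i in range(1, n+1): idx = first[sorted_desc[i-1]]; if m-idx-1 >= n-1: return [joltages[idx], suf[idx+1]]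
def loopB (joltages : List Int) (n : Int) (sorted_desc : List Int)
    (first : PySem.Dict Int Int) (suf : List Int) (m : Int) : List Int → Option (List Int)
  | [] => none
  | i :: rest =>
    match PySem.List.pyGet? sorted_desc (i - 1) with
    | none => none
    | some v =>
      match first.get? v with
      | none => none
      | some idx =>
        if m - idx - 1 ≥ n - 1 then
          match PySem.List.pyGet? joltages idx, PySem.List.pyGet? suf (idx + 1) with
          | some a, some s => some [a, s]
          | _, _ => none
        else loopB joltages n sorted_desc first suf m rest

def n_ordered_largest_alt (joltages : List Int) (n : Int) : Option (List Int) :=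
  loopB joltages n (PySem.List.sorted joltages (fun x => x) true)
    (firstIdxB joltages) (sufMaxB joltages) (joltages.length : Int)
    (PySem.List.pyRange 1 (n + 1) 1)

-- ===== PRECONDITION & SPEC =====
-- Pre_ excludes exactly the inputs on which Python A raises: 1 ≤ n with n > len(joltages)
-- (IndexError on the sorted list) and the n = 1 inputs whose maximum occurs only at the
-- last position (max([]) ValueError); A returns a value on every other input.
def Pre_n_ordered_largest (joltages : List Int) (n : Int) : Prop :=
  n ≤ 0 ∨ (n ≤ (joltages.length : Int) ∧
    (n = 1 → ∃ x ∈ joltages.dropLast, ∀ y ∈ joltages, y ≤ x))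
instance (joltages : List Int) (n : Int) : Decidable (Pre_n_ordered_largest joltages n) := by
  unfold Pre_n_ordered_largest; infer_instance

def pvWitness_n_ordered_largest : List Int × Int := ([3, 1, 4, 1, 5], 2)

def Spec_n_ordered_largest (joltages : List Int) (n : Int) (out : Option (List Int)) : Prop :=
  out = n_ordered_largest_alt joltages n
instance (joltages : List Int) (n : Int) (out : Option (List Int)) :
    Decidable (Spec_n_ordered_largest joltages n out) := by
  unfold Spec_n_ordered_largest; infer_instance

-- ===== CLAIM (what is proved, stated in full; the proofs are below) =====
def Claim_equal_n_ordered_largest : Prop := ∀ (joltages : List Int) (n : Int),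
  Dom_n_ordered_largest joltages n → Pre_n_ordered_largest joltages n →
  Spec_n_ordered_largest joltages n (n_ordered_largest joltages n)

-- ===== LEMMAS AND PROOFS =====

-- max? with the identity key on a nonempty list is the left fold of max
theorem maxP_cons (l : List Int) : ∀ x : Int, PySem.List.max? (x :: l) (fun y => y) = some (l.foldl max x) := by
  induction l with
  | nil => intro x; rfl
  | cons a as ih =>
    intro x
    have h1 : PySem.List.max? (x :: a :: as) (fun y => y) = PySem.List.max? (max x a :: as) (fun y => y) := by
      simp only [PySem.List.max?, List.foldl]
      congr 1
      split_ifs with h <;> simp [max_def] <;> omega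
    rw [h1, ih, List.foldl_cons]

theorem length_sufMaxB (js : List Int) : (sufMaxB js).length = js.length := by
  induction js with
  | nil => rfl
  | cons v rest ih =>
    rw [sufMaxB.eq_2]
    cases h : sufMaxB rest with
    | nil => rw [h] at ih; simp [← ih]
    | cons w ws => rw [h] at ih; simpa using ih

-- B's suffix-max array indexed at k is max(joltages[k:])
theorem sufMaxB_spec (js : List Int) (k : Nat) :
    (sufMaxB js)[k]? = PySem.List.max? (js.drop k) (fun x => x) := by
  induction js generalizing k with
  | nil => simp [sufMaxB, PySem.List.max?]
  | cons v rest ih =>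
    cases k with
    | zero =>
      rw [List.drop_zero, maxP_cons, sufMaxB.eq_2]
      cases hr : sufMaxB rest with
      | nil =>
        have hre : rest = [] := by
          have := length_sufMaxB rest; rw [hr] at this; simpa using this.symm
        subst hre; simp
      | cons w ws =>
        cases rest with
        | nil => simp [sufMaxB] at hr
        | cons r rs =>
          have h0 := ih 0
          rw [hr, List.drop_zero, maxP_cons] at h0
          have hw : w = rs.foldl max r := by simpa using h0
          simp only [List.getElem?_cons_zero, List.foldl_cons]
          rw [hw, ← List.foldl_assoc (op := max)]
    | succ k =>
      rw [sufMaxB.eq_2]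
      cases hr : sufMaxB rest with
      | nil =>
        have hre : rest = [] := by
          have := length_sufMaxB rest; rw [hr] at this; simpa using this.symm
        subst hre
        simp [PySem.List.max?]
      | cons w ws =>
        have h := ih k
        rw [hr] at h
        simpa using h

-- B's setdefault-style dict loop looks up the first index of a value, shifted by the start
theorem firstIdx_aux (js : List Int) (s : Int) (d : PySem.Dict Int Int) (v : Int) :
    ((PySem.List.enumerate js s).foldl
      (fun d p => if d.contains p.2 then d else d.insert p.2 p.1) d).get? v
    = ((d.get? v).orElse (fun _ => (PySem.List.index? js v).map (fun k => s + (k : Int)))) := by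
  induction js generalizing s d with
  | nil =>
    simp only [PySem.List.enumerate_nil, List.foldl_nil, PySem.List.index?]
    cases d.get? v <;> simp [Option.orElse]
  | cons x xs ih =>
    rw [PySem.List.enumerate_cons]
    simp only [List.foldl_cons]
    by_cases hc : d.contains x
    · rw [if_pos hc, ih]
      by_cases hxv : x = v
      · subst hxv
        have hs : (d.get? x).isSome := by rw [← PySem.Dict.contains_eq_isSome_get?]; exact hc
        obtain ⟨w, hw⟩ := Option.isSome_iff_exists.mp hs
        simp [hw, Option.orElse]
      · rw [PySem.List.index?_cons_of_ne xs hxv]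
        cases hdv : d.get? v with
        | some w => simp [Option.orElse]
        | none =>
          simp only [Option.orElse]
          cases PySem.List.index? xs v with
          | none => simp
          | some k => simp; ring
    · rw [if_neg hc, ih]
      by_cases hxv : x = v
      · subst hxv
        have hdv : d.get? x = none := by
          rcases h : d.get? x with _ | w
          · rfl
          · exfalso; apply hc; rw [PySem.Dict.contains_eq_isSome_get?, h]; rfl
        rw [PySem.Dict.get?_insert_self, PySem.List.index?_cons_self]
        simp [hdv, Option.orElse]
      · rw [PySem.Dict.get?_insert_of_ne _ _ (fun h => hxv h.symm)]
        rw [PySem.List.index?_cons_of_ne xs hxv]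
        cases hdv : d.get? v with
        | some w => simp [Option.orElse]
        | none =>
          simp only [Option.orElse]
          cases PySem.List.index? xs v with
          | none => simp
          | some k => simp; ring

-- the two loops agree step for step on any iteration list
theorem loop_eq (js : List Int) (n : Int) (r : List Int) :
    loopA js n r = loopB js n (PySem.List.sorted js (fun x => x) true)
      (firstIdxB js) (sufMaxB js) (js.length : Int) r := by
  induction r with
  | nil => rfl
  | cons i rest ih =>
    cases hv : PySem.List.pyGet? (PySem.List.sorted js (fun x => x) true) (i - 1) with
    | none => simp [loopA, loopB, nthLargestIndexA, hv]
    | some v =>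
      have hmem : v ∈ js :=
        (PySem.List.mem_sorted js (fun x => x) true v).mp (PySem.List.mem_of_pyGet?_eq_some _ hv)
      obtain ⟨k, hk⟩ := Option.isSome_iff_exists.mp ((PySem.List.index?_isSome_iff js v).mpr hmem)
      obtain ⟨hklt, hkval, -⟩ := PySem.List.getElem_of_index?_eq_some hk
      have hfirst : (firstIdxB js).get? v = some (k : Int) := by
        unfold firstIdxB
        rw [firstIdx_aux]
        simp only [hk]
        simp [PySem.Dict.empty, PySem.Dict.get?, Option.orElse]
      have htn : ((k : Int) + 1).toNat = k + 1 := by omega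
      have hslice : PySem.List.slice js (some ((k : Int) + 1)) none = js.drop (k + 1) := by
        rw [PySem.List.slice_from js (by omega : (0:Int) ≤ (k:Int) + 1), htn]
      simp only [loopA, loopB, nthLargestIndexA, hv, hk, hfirst, hslice]
      have hlen : ((js.drop (k + 1)).length : Int) = (js.length : Int) - (k : Int) - 1 := by
        simp [List.length_drop]; omega
      by_cases hcond : ((js.length : Int) - (k : Int) - 1 < n - 1)
      · rw [if_pos (by omega : ((js.drop (k+1)).length : Int) < n - 1),
            if_neg (by omega : ¬((js.length : Int) - (k : Int) - 1 ≥ n - 1))]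
        exact ih
      · rw [if_neg (by omega : ¬(((js.drop (k+1)).length : Int) < n - 1)),
            if_pos (by omega : ((js.length : Int) - (k : Int) - 1 ≥ n - 1))]
        have hsuf : PySem.List.pyGet? (sufMaxB js) ((k : Int) + 1)
            = PySem.List.max? (js.drop (k + 1)) (fun x => x) := by
          have hcast : ((k : Int) + 1) = ((k + 1 : Nat) : Int) := by omega
          rw [hcast, PySem.List.pyGet?_natCast, sufMaxB_spec]
        rw [hsuf]

-- ===== VERDICT (by name: the statement is the Claim_ definition above) =====
theorem n_ordered_largest_spec : Claim_equal_n_ordered_largest := by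
  intro joltages n _ _
  unfold Spec_n_ordered_largest n_ordered_largest n_ordered_largest_alt
  exact loop_eq joltages n _
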